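-- pv_equiv track=rewrite | github.com/Nathan-Cherny/PhillySSBURankings | main.py | organizeAllTournamentsByTheirOwner
-- ===== SOURCE A (Python) =====
-- def organizeAllTournamentsByTheirOwner(tournaments):
--     organizedTournaments = {}
--
--     for tournament in tournaments:
--         if tournament['venueAddress'] not in organizedTournaments.keys():
--             organizedTournaments[tournament['venueAddress']] = [tournament['slug']]
--         else:
--             organizedTournaments[tournament['venueAddress']].append(tournament['slug'])
--
--     return organizedTournaments
-- ===== SOURCE B (Python) =====
-- def organizeAllTournamentsByTheirOwner(tournaments):
--     addresses = list(dict.fromkeys(t['venueAddress'] for t in tournaments))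
--     return {a: [t['slug'] for t in tournaments if t['venueAddress'] == a]
--             for a in addresses}
-- ===== Notes on version B (the rewrite author's own statement) =====
-- stated objective: alternative
-- what changed: B first collects the distinct venue addresses in first-appearance order, then builds each group with one comprehension pass per address, instead of A's incremental dict-membership-and-append loop.
import Mathlib
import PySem

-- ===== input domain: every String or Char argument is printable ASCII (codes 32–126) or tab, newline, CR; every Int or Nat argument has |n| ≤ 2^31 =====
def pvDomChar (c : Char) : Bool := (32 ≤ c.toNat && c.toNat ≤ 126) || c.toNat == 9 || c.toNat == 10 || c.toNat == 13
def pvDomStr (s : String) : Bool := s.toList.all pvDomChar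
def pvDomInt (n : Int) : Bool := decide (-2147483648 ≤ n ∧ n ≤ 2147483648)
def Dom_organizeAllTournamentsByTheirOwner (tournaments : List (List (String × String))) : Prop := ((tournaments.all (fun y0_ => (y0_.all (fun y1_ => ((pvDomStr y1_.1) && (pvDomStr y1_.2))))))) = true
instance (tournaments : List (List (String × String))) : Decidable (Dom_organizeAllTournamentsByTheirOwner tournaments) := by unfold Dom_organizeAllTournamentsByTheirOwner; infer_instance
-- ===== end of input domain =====

-- B groups slugs by collecting the distinct venue addresses first and then making one
-- filtering pass per address, instead of A's incremental dict-membership-and-append loop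
-- (objective: alternative decomposition, same results, no speed claim).

-- shared helper: tournament['venueAddress'] / tournament['slug'] (first-match dict lookup;
-- the '.getD ""' default is only reached outside Pre_, where the Python raises KeyError)
def pvAddr (t : List (String × String)) : String :=
  ((PySem.Dict.mk t).get? "venueAddress").getD ""
def pvSlug (t : List (String × String)) : String :=
  ((PySem.Dict.mk t).get? "slug").getD ""

-- ===== PORT A =====
def organizeAllTournamentsByTheirOwner (tournaments : List (List (String × String))) : List (String × List String) :=
  (tournaments.foldl
    (fun (d : PySem.Dict String (List String)) t =>
      if !(d.keys.contains (pvAddr t)) then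
        d.insert (pvAddr t) [pvSlug t]
      else
        d.insert (pvAddr t) (d.getD (pvAddr t) [] ++ [pvSlug t]))
    PySem.Dict.empty).items

-- ===== PORT B =====
def organizeAllTournamentsByTheirOwner_alt (tournaments : List (List (String × String))) : List (String × List String) :=
  let addresses := PySem.Set.ofList (tournaments.map pvAddr)
  addresses.map (fun a => (a, (tournaments.filter (fun t => pvAddr t == a)).map pvSlug))

-- ===== PRECONDITION & SPEC =====
-- Pre_ excludes exactly the inputs on which Python A raises KeyError: a tournament
-- without a 'venueAddress' or 'slug' key.
def Pre_organizeAllTournamentsByTheirOwner (tournaments : List (List (String × String))) : Prop :=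
  ∀ t ∈ tournaments, ((PySem.Dict.mk t).get? "venueAddress").isSome = true ∧
                     ((PySem.Dict.mk t).get? "slug").isSome = true
instance (tournaments : List (List (String × String))) : Decidable (Pre_organizeAllTournamentsByTheirOwner tournaments) := by unfold Pre_organizeAllTournamentsByTheirOwner; infer_instance

def pvWitness_organizeAllTournamentsByTheirOwner : (List (List (String × String))) :=
  [[("venueAddress", "1 Main St"), ("slug", "t1")],
   [("venueAddress", "2 Oak Ave"), ("slug", "t2")],
   [("venueAddress", "1 Main St"), ("slug", "t3")]]

def Spec_organizeAllTournamentsByTheirOwner (tournaments : List (List (String × String))) (out : List (String × List String)) : Prop := out = organizeAllTournamentsByTheirOwner_alt tournaments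
instance (tournaments : List (List (String × String))) (out : List (String × List String)) : Decidable (Spec_organizeAllTournamentsByTheirOwner tournaments out) := by unfold Spec_organizeAllTournamentsByTheirOwner; infer_instance

-- ===== CLAIM (what is proved, stated in full; the proofs are below) =====
def Claim_equal_organizeAllTournamentsByTheirOwner : Prop := ∀ (tournaments : List (List (String × String))), Dom_organizeAllTournamentsByTheirOwner tournaments → Pre_organizeAllTournamentsByTheirOwner tournaments → Spec_organizeAllTournamentsByTheirOwner tournaments (organizeAllTournamentsByTheirOwner tournaments)

-- ===== LEMMAS AND PROOFS =====

-- A's branchy loop body is one dict 'modify' step (absent key: getD default [] gives [slug]).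
theorem pvStep_eq_modify (d : PySem.Dict String (List String)) (t : List (String × String)) :
    (if !(d.keys.contains (pvAddr t)) then d.insert (pvAddr t) [pvSlug t]
     else d.insert (pvAddr t) (d.getD (pvAddr t) [] ++ [pvSlug t]))
    = d.modify (pvAddr t) [] (· ++ [pvSlug t]) := by
  simp only [PySem.Dict.modify]
  by_cases hm : pvAddr t ∈ d.keys
  · simp [hm]
  · simp [hm, PySem.Dict.getD_of_not_contains, PySem.Dict.contains_eq_decide_mem_keys]

theorem organizeAllTournamentsByTheirOwner_spec : Claim_equal_organizeAllTournamentsByTheirOwner := by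
  intro ts _ _
  show organizeAllTournamentsByTheirOwner ts = organizeAllTournamentsByTheirOwner_alt ts
  unfold organizeAllTournamentsByTheirOwner organizeAllTournamentsByTheirOwner_alt
  have hfold : (ts.foldl
      (fun (d : PySem.Dict String (List String)) t =>
        if !(d.keys.contains (pvAddr t)) then d.insert (pvAddr t) [pvSlug t]
        else d.insert (pvAddr t) (d.getD (pvAddr t) [] ++ [pvSlug t]))
      PySem.Dict.empty)
      = (ts.map (fun t => (pvAddr t, pvSlug t))).foldl
          (fun d p => d.modify p.1 [] (· ++ [p.2])) PySem.Dict.empty := by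
    rw [List.foldl_map]
    congr 1
    funext d t
    exact pvStep_eq_modify d t
  rw [hfold]
  set L := ts.map (fun t => (pvAddr t, pvSlug t)) with hL
  set D := L.foldl (fun d p => d.modify p.1 [] (· ++ [p.2])) PySem.Dict.empty with hD
  have hnd : D.keys.Nodup := by
    rw [hD]
    exact PySem.Dict.nodup_keys_foldl_modify_key L Prod.fst [] (fun d p => (· ++ [p.2]))
      PySem.Dict.empty (by simp)
  have hkeys : D.keys = PySem.Set.ofList (ts.map pvAddr) := by
    rw [hD, PySem.Dict.keys_foldl_modify_key]
    simp [hL, PySem.Set.update_nil_left, List.map_map]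
    rfl
  have hget : ∀ c, D.getD c [] = (ts.filter (fun t => pvAddr t == c)).map pvSlug := by
    intro c
    rw [hD, PySem.Dict.getD_foldl_modify_append]
    simp [hL, List.filter_map, List.map_map]
    rfl
  rw [PySem.Dict.items_eq_map_keys D hnd [], hkeys]
  exact List.map_congr_left (fun a _ => by rw [hget a])
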